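-- pv_equiv track=rewrite | github.com/okiprasetyo69/piintu | scheme.py | get_scheme
-- ===== SOURCE A (Python) =====
-- def get_scheme(value):
--     str_val = value
--     words = str_val.split("piintu-", 1)[1]
--     sc_words = str_val.split("sc-", 1)[1]
--     str_data_div = ''
--     str_data_i = ''
--     arr = []
--     # test case a on progress :D
--     # test case b
--     for item in words:
--         if item == '>' or item == " ":
--             break
--         str_data_div += item
--     for items in sc_words:
--         if items == '>' or items == " ":
--             break
--         str_data_i += items
--     if str_data_i is None:
--         arr.append(str_data_div)
--     else:
--         arr.extend([str_data_div, str_data_i])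
--
--     return arr
-- ===== SOURCE B (Python) =====
-- def _token(value, marker):
--     rest = value[value.index(marker) + len(marker):]
--     cut = len(rest)
--     for d in ('>', ' '):
--         p = rest.find(d)
--         if p != -1 and p < cut:
--             cut = p
--     return rest[:cut]
--
--
-- def get_scheme(value):
--     return [_token(value, "piintu-"), _token(value, "sc-")]
-- ===== Notes on version B (the rewrite author's own statement) =====
-- stated objective: simpler
-- what changed: B replaces A's split(marker,1)[1] plus char-by-char accumulation loops with a direct find-then-slice: slice the string after each marker and cut it at the nearest delimiter position (closing angle bracket or blank) computed via find.
import Mathlib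
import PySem

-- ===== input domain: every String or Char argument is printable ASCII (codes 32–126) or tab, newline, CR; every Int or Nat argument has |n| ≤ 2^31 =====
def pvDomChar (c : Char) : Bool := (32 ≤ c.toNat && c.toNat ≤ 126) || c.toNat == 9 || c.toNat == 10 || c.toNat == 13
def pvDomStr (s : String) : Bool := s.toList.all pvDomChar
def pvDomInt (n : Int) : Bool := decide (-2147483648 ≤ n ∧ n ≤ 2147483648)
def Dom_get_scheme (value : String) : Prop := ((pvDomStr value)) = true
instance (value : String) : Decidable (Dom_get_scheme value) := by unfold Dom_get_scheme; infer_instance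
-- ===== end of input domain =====

-- B extracts each token by find-then-slice (cut at the nearest delimiter, closing angle bracket or blank) instead of A's
-- split-and-char-by-char accumulation loops; objective: simpler.

-- ===== PORT A =====
-- the "for item in words: if item == '>' or item == ' ': break; str_data += item" loop of A
def pvTakeA : List Char → List Char → List Char
  | acc, [] => acc
  | acc, c :: cs => if c = '>' ∨ c = ' ' then acc else pvTakeA (acc ++ [c]) cs

def get_scheme (value : String) : List String :=
  let strVal := value.toList
  -- words = str_val.split("piintu-", 1)[1] ; the [1] raises IndexError when the marker is absent (outside Pre_)
  let words := (PySem.List.pyGet? ((PySem.Chars.splitMax? strVal "piintu-".toList 1).getD []) 1).getD []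
  let scWords := (PySem.List.pyGet? ((PySem.Chars.splitMax? strVal "sc-".toList 1).getD []) 1).getD []
  let strDataDiv := pvTakeA [] words
  let strDataI := pvTakeA [] scWords
  -- Python's "if str_data_i is None" is identically False (str_data_i is a str), so only the
  -- else branch "arr.extend([str_data_div, str_data_i])" is reachable; it is ported as such.
  [String.ofList strDataDiv, String.ofList strDataI]

-- ===== PORT B =====
-- _token(value, marker) from Source B: slice after the marker, cut at the nearest delimiter
def pvToken (value : List Char) (marker : List Char) : List Char :=
  let rest := PySem.Chars.slice value (some (PySem.Chars.find value marker + marker.length)) none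
  let cut := (['>', ' '] : List Char).foldl (fun cut d =>
      let p := PySem.Chars.find rest [d]
      if p ≠ -1 ∧ p < cut then p else cut) (rest.length : Int)
  PySem.Chars.slice rest none (some cut)

def get_scheme_alt (value : String) : List String :=
  [String.ofList (pvToken value.toList "piintu-".toList), String.ofList (pvToken value.toList "sc-".toList)]

-- ===== PRECONDITION & SPEC =====
-- Pre_ excludes exactly the inputs where A raises IndexError: a marker substring is absent,
-- so split(marker, 1)[1] indexes past the end.
def Pre_get_scheme (value : String) : Prop :=
  PySem.Str.isIn "piintu-" value = true ∧ PySem.Str.isIn "sc-" value = true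
instance (value : String) : Decidable (Pre_get_scheme value) := by unfold Pre_get_scheme; infer_instance
def pvWitness_get_scheme : String := "x piintu-div7>y sc-3> z"

def Spec_get_scheme (value : String) (out : List String) : Prop := out = get_scheme_alt value
instance (value : String) (out : List String) : Decidable (Spec_get_scheme value out) := by unfold Spec_get_scheme; infer_instance

-- ===== CLAIM (what is proved, stated in full; the proofs are below) =====
def Claim_equal_get_scheme : Prop := ∀ (value : String), Dom_get_scheme value → Pre_get_scheme value → Spec_get_scheme value (get_scheme value)

-- ===== LEMMAS AND PROOFS =====

-- find.go shifts its running index: the result at start k is the result at 0, shifted by k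
lemma pv_find_go_shift (sep : List Char) (hsep : sep ≠ []) :
    ∀ (l : List Char) (k : Nat), PySem.Chars.find.go sep l k =
      if PySem.Chars.find l sep = -1 then -1 else PySem.Chars.find l sep + k := by
  intro l
  induction l with
  | nil =>
    intro k
    simp [PySem.Chars.find, PySem.Chars.find.go, List.isEmpty_iff, hsep]
  | cons c cs ih =>
    intro k
    rw [PySem.Chars.find.go, PySem.Chars.find, PySem.Chars.find.go]
    by_cases hp : sep.isPrefixOf (c :: cs) = true
    · simp [hp]
    · simp only [Bool.not_eq_true] at hp
      simp only [hp]
      rw [ih (k+1), ih 1]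
      have hb := PySem.Chars.neg_one_le_find cs sep
      by_cases hf : PySem.Chars.find cs sep = -1 <;>
        simp [hf] <;> split_ifs <;> omega

-- single-character find, characterised by takeWhile
lemma pv_find_char (d : Char) : ∀ (l : List Char),
    PySem.Chars.find l [d] =
      if (l.takeWhile (· ≠ d)).length < l.length then ((l.takeWhile (· ≠ d)).length : Int) else -1 := by
  intro l
  induction l with
  | nil => simp [PySem.Chars.find, PySem.Chars.find.go]
  | cons c cs ih =>
    rw [PySem.Chars.find, PySem.Chars.find.go]
    by_cases hc : c = d
    · subst hc
      simp [List.isPrefixOf, List.takeWhile]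
    · have hp : ([d].isPrefixOf (c :: cs)) = false := by
        simp [List.isPrefixOf]; exact fun h => (hc h.symm).elim
      simp only [hp, Bool.false_eq_true, if_false]
      rw [pv_find_go_shift [d] (by simp) cs 1, ih]
      have hle := (List.takeWhile_sublist (l := cs) (· ≠ d)).length_le
      simp only [List.takeWhile]
      by_cases hlt : (cs.takeWhile (· ≠ d)).length < cs.length <;>
        simp [hlt, hc] <;> omega

-- splitOnMax.go with 0 splits left just closes the current piece
lemma pv_split_go_zero (sep : List Char) :
    ∀ (fuel : Nat) (l : List Char) (acc : List (List Char)),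
      PySem.Chars.splitOnMax.go sep fuel 0 l [] acc = (l :: acc).reverse := by
  intro fuel l acc
  match fuel, l with
  | 0, l => rw [PySem.Chars.splitOnMax.go]; simp
  | fuel+1, [] => simp [PySem.Chars.splitOnMax.go]
  | fuel+1, c :: rest => simp [PySem.Chars.splitOnMax.go]

-- splitOnMax.go with 1 split left, characterised by find
lemma pv_split_go_one (sep : List Char) (hsep : sep ≠ []) :
    ∀ (l : List Char) (fuel : Nat) (cur : List Char) (acc : List (List Char)),
      l.length < fuel →
      PySem.Chars.splitOnMax.go sep fuel 1 l cur acc =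
        if PySem.Chars.find l sep = -1 then ((cur.reverse ++ l) :: acc).reverse
        else ((l.drop ((PySem.Chars.find l sep).toNat + sep.length)) ::
              (cur.reverse ++ l.take (PySem.Chars.find l sep).toNat) :: acc).reverse := by
  intro l
  induction l with
  | nil =>
    intro fuel cur acc hf
    match fuel, hf with
    | f+1, hf' =>
      have : PySem.Chars.find [] sep = -1 := by
        simp [PySem.Chars.find, PySem.Chars.find.go, List.isEmpty_iff, hsep]
      simp [PySem.Chars.splitOnMax.go, this]
  | cons c cs ih =>
    intro fuel cur acc hf
    match fuel, hf with
    | f+1, hf' =>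
      rw [PySem.Chars.splitOnMax.go]
      by_cases hp : sep.isPrefixOf (c :: cs) = true
      · have hfind : PySem.Chars.find (c :: cs) sep = 0 := by
          rw [PySem.Chars.find, PySem.Chars.find.go]; simp [hp]
        simp only [hp, if_true, hfind]
        rw [pv_split_go_zero]
        norm_num
      · have hfind : PySem.Chars.find (c :: cs) sep =
            if PySem.Chars.find cs sep = -1 then -1 else PySem.Chars.find cs sep + 1 := by
          rw [PySem.Chars.find, PySem.Chars.find.go]
          simp only [hp, Bool.false_eq_true, if_false]
          exact pv_find_go_shift sep hsep cs 1
        simp only [hp, Bool.false_eq_true, if_false, if_neg (by omega : ¬ (1:Nat) = 0)]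
        rw [ih f (c :: cur) acc (by simpa using Nat.lt_of_succ_lt_succ hf'), hfind]
        have hb := PySem.Chars.neg_one_le_find cs sep
        by_cases hcs : PySem.Chars.find cs sep = -1
        · simp [hcs]
        · have h0 : 0 ≤ PySem.Chars.find cs sep := by omega
          have h1 : PySem.Chars.find cs sep + 1 ≠ -1 := by omega
          simp only [hcs, if_false, h1]
          have ht : (PySem.Chars.find cs sep + 1).toNat = (PySem.Chars.find cs sep).toNat + 1 := by omega
          rw [ht]
          have harr : (PySem.Chars.find cs sep).toNat + 1 + sep.length =
              ((PySem.Chars.find cs sep).toNat + sep.length) + 1 := by omega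
          simp [List.take_succ_cons, harr, List.drop_succ_cons]

-- s.split(sep, 1) in closed form
lemma pv_split_one (s sep : List Char) (hsep : sep ≠ []) :
    PySem.Chars.splitOnMax s sep 1 =
      if PySem.Chars.find s sep = -1 then [s]
      else [s.take (PySem.Chars.find s sep).toNat,
            s.drop ((PySem.Chars.find s sep).toNat + sep.length)] := by
  rw [PySem.Chars.splitOnMax]
  rw [if_neg (by omega)]
  have h1 : (1 : Int).toNat = 1 := rfl
  rw [h1, pv_split_go_one sep hsep s (s.length + 1) [] [] (by omega)]
  by_cases hf : PySem.Chars.find s sep = -1 <;> simp [hf]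

-- A's accumulation loop is takeWhile
lemma pv_takeA_eq (l : List Char) : ∀ (acc : List Char),
    pvTakeA acc l = acc ++ l.takeWhile (fun c => !(c = '>' ∨ c = ' ')) := by
  induction l with
  | nil => intro acc; simp [pvTakeA]
  | cons c cs ih =>
    intro acc
    rw [pvTakeA]
    by_cases hc : c = '>' ∨ c = ' '
    · simp [hc, List.takeWhile]
    · rw [ih]
      simp [List.takeWhile, hc]

-- taking min of the two one-character cut points is takeWhile of the conjunction
lemma pv_take_min (l : List Char) :
    l.take (min (l.takeWhile (· ≠ '>')).length (l.takeWhile (· ≠ ' ')).length) =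
      l.takeWhile (fun c => !(c = '>' ∨ c = ' ')) := by
  induction l with
  | nil => simp
  | cons c cs ih =>
    by_cases hc : c = '>' ∨ c = ' '
    · rcases hc with hc | hc <;> subst hc <;> simp [List.takeWhile]
    · have hc1 : c ≠ '>' := fun h => hc (Or.inl h)
      have hc2 : c ≠ ' ' := fun h => hc (Or.inr h)
      simp only [List.takeWhile, hc1, hc2]
      simp only [ne_eq, hc1, not_false_eq_true, decide_true, hc2, List.length_cons]
      rw [Nat.succ_min_succ, List.take_succ_cons, ih]
      simp [List.takeWhile, hc1, hc2]

-- B's cut-and-slice equals takeWhile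
lemma pv_token_tail (rest : List Char) :
    PySem.Chars.slice rest none (some ((['>', ' '] : List Char).foldl (fun cut d =>
        let p := PySem.Chars.find rest [d]
        if p ≠ -1 ∧ p < cut then p else cut) (rest.length : Int))) =
      rest.takeWhile (fun c => !(c = '>' ∨ c = ' ')) := by
  have h1 := pv_find_char '>' rest
  have h2 := pv_find_char ' ' rest
  have hl1 := (List.takeWhile_sublist (l := rest) (· ≠ '>')).length_le
  have hl2 := (List.takeWhile_sublist (l := rest) (· ≠ ' ')).length_le
  set L1 := (rest.takeWhile (· ≠ '>')).length with hL1
  set L2 := (rest.takeWhile (· ≠ ' ')).length with hL2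
  have hcut : (['>', ' '] : List Char).foldl (fun cut d =>
        let p := PySem.Chars.find rest [d]
        if p ≠ -1 ∧ p < cut then p else cut) (rest.length : Int) = ((min L1 L2 : Nat) : Int) := by
    simp only [List.foldl_cons, List.foldl_nil, h1, h2]
    split_ifs <;> omega
  rw [hcut, PySem.Chars.slice, PySem.List.slice_to rest (by omega)]
  have : ((min L1 L2 : Nat) : Int).toNat = min L1 L2 := by omega
  rw [this, pv_take_min]

-- both programs, one marker: the token each extracts, when the marker is present
lemma pv_main (val marker : List Char) (hsep : marker ≠ [])
    (h : marker <:+: val) :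
    pvTakeA [] ((PySem.List.pyGet? ((PySem.Chars.splitMax? val marker 1).getD []) 1).getD []) =
      pvToken val marker := by
  have hpos : 0 ≤ PySem.Chars.find val marker := (PySem.Chars.find_nonneg_iff val marker).2 h
  have hne : PySem.Chars.find val marker ≠ -1 := by omega
  have hsplit : PySem.Chars.splitMax? val marker 1 = some (PySem.Chars.splitOnMax val marker 1) := by
    simp [PySem.Chars.splitMax?, List.isEmpty_iff, hsep]
  rw [hsplit, Option.getD_some, pv_split_one val marker hsep, if_neg hne]
  have hget : PySem.List.pyGet?
      [val.take (PySem.Chars.find val marker).toNat,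
       val.drop ((PySem.Chars.find val marker).toNat + marker.length)] (1 : Int) =
      some (val.drop ((PySem.Chars.find val marker).toNat + marker.length)) := by
    simp [PySem.List.pyGet?, PySem.List.pyIdx?]
  rw [hget, Option.getD_some, pvToken]
  have hrest : PySem.Chars.slice val (some (PySem.Chars.find val marker + marker.length)) none =
      val.drop ((PySem.Chars.find val marker).toNat + marker.length) := by
    rw [PySem.Chars.slice, PySem.List.slice_from val (by omega)]
    congr 1
    omega
  rw [hrest]
  rw [pv_takeA_eq, pv_token_tail]
  simp

-- ===== VERDICT (by name: the statement is the Claim_ definition above) =====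
theorem get_scheme_spec : Claim_equal_get_scheme := by
  intro value _ hpre
  unfold Spec_get_scheme get_scheme get_scheme_alt
  obtain ⟨h1, h2⟩ := hpre
  rw [PySem.Str.isIn_iff_infix] at h1 h2
  simp only []
  rw [pv_main _ _ (by decide) h1, pv_main _ _ (by decide) h2]
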